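-- pv_equiv track=rewrite | github.com/adafdelcid/Whole-Enrichment | Whole_Enrichment.py | get_dict_organs_by_cell_type
-- ===== SOURCE A (Python) =====
-- def get_dict_organs_by_cell_type(d_samples_by_cell_type, list_organs):
--     """
--     get_dict_organs_by_cell_type : creates a dictionary with organ keys and samples of that organ organized by cell type
--         inputs:
--             d_samples_by_cell_type : samples organized by cell type
--             list_organs : list of organs sorted
--         output:
--             d_organs_by_cell_type : dictionary of organs with samples organized by cell type within organ
--     """
--     d_organs_by_cell_type = {}
--
--     for organ in list_organs:
--         d_organs_by_cell_type[organ] = {}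
--         for sample_cell_type in d_samples_by_cell_type:
--             if sample_cell_type[0] == organ:
--                 d_organs_by_cell_type[organ][sample_cell_type] = d_samples_by_cell_type[sample_cell_type]
--
--     return d_organs_by_cell_type
-- ===== SOURCE B (Python) =====
-- def get_dict_organs_by_cell_type(d_samples_by_cell_type, list_organs):
--     """One pass: initialise every organ's bucket, then route each sample by its first character."""
--     d_organs_by_cell_type = {organ: {} for organ in list_organs}
--     for sample_cell_type, samples in d_samples_by_cell_type.items():
--         organ = sample_cell_type[:1]
--         if organ in d_organs_by_cell_type:
--             d_organs_by_cell_type[organ][sample_cell_type] = samples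
--     return d_organs_by_cell_type
-- ===== Notes on version B (the rewrite author's own statement) =====
-- stated objective: faster
-- what changed: A rescans the whole sample dict once per organ (nested loops); B initialises all organ buckets, then makes a single pass over the samples routing each by its first character into its bucket.
import Mathlib
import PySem

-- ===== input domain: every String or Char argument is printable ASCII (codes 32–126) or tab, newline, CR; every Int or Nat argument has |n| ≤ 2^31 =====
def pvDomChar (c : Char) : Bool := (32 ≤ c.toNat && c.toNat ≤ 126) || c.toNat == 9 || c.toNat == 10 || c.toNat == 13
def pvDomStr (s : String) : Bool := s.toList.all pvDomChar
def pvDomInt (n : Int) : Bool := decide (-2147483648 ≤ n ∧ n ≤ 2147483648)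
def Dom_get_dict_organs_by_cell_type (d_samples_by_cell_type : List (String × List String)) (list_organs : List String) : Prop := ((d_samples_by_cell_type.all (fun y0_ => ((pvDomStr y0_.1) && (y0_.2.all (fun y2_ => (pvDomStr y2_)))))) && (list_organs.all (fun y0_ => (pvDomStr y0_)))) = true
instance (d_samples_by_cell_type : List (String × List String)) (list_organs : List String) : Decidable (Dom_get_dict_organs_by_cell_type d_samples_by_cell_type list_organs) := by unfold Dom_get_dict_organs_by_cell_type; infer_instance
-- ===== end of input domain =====

-- B replaces A's per-organ rescan of the whole sample dict by one bucket-routing pass over the samples (objective: faster).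

-- ===== PORT A =====
def get_dict_organs_by_cell_type (d_samples_by_cell_type : List (String × List String)) (list_organs : List String) : List (String × List (String × List String)) :=
  let dd : PySem.Dict String (List String) := PySem.Dict.mk d_samples_by_cell_type
  let res : PySem.Dict String (PySem.Dict String (List String)) :=
    list_organs.foldl (fun acc organ =>
      List.foldl (fun acc2 kv =>
        match PySem.Str.pyGet? kv.1 0 with
        | none => acc2   -- Python raises IndexError here (empty key); excluded by Pre_
        | some c =>
          if String.ofList [c] = organ then
            acc2.modify organ PySem.Dict.empty (fun inner => inner.insert kv.1 (dd.getD kv.1 []))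
          else acc2)
        (acc.insert organ PySem.Dict.empty) d_samples_by_cell_type)
      PySem.Dict.empty
  res.items.map (fun p => (p.1, p.2.items))

-- ===== PORT B =====
def get_dict_organs_by_cell_type_alt (d_samples_by_cell_type : List (String × List String)) (list_organs : List String) : List (String × List (String × List String)) :=
  let init : PySem.Dict String (PySem.Dict String (List String)) :=
    list_organs.foldl (fun acc organ => acc.insert organ PySem.Dict.empty) PySem.Dict.empty
  let res : PySem.Dict String (PySem.Dict String (List String)) :=
    List.foldl (fun acc kv =>
      let organ := PySem.Str.slice kv.1 none (some 1)
      if acc.contains organ then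
        acc.modify organ PySem.Dict.empty (fun inner => inner.insert kv.1 kv.2)
      else acc) init d_samples_by_cell_type
  res.items.map (fun p => (p.1, p.2.items))

-- ===== PRECONDITION & SPEC =====
-- Pre_ excludes association lists with duplicate sample keys (they do not represent a Python dict, so the
-- assoc-list ports diverge there) and, when list_organs is nonempty, sample dicts containing an empty-string
-- key (A raises IndexError on sample_cell_type[0]).
def Pre_get_dict_organs_by_cell_type (d_samples_by_cell_type : List (String × List String)) (list_organs : List String) : Prop :=
  (d_samples_by_cell_type.map Prod.fst).Nodup ∧
    (list_organs = [] ∨ ∀ kv ∈ d_samples_by_cell_type, kv.1 ≠ "")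
instance (d_samples_by_cell_type : List (String × List String)) (list_organs : List String) : Decidable (Pre_get_dict_organs_by_cell_type d_samples_by_cell_type list_organs) := by unfold Pre_get_dict_organs_by_cell_type; infer_instance

def pvWitness_get_dict_organs_by_cell_type : (List (String × List String)) × List String :=
  ([("Ax", ["s1"]), ("Bx", ["s2"])], ["A", "B"])

def Spec_get_dict_organs_by_cell_type (d_samples_by_cell_type : List (String × List String)) (list_organs : List String) (out : List (String × List (String × List String))) : Prop := out = get_dict_organs_by_cell_type_alt d_samples_by_cell_type list_organs
instance (d_samples_by_cell_type : List (String × List String)) (list_organs : List String) (out : List (String × List (String × List String))) : Decidable (Spec_get_dict_organs_by_cell_type d_samples_by_cell_type list_organs out) := by unfold Spec_get_dict_organs_by_cell_type; infer_instance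

-- ===== CLAIM (what is proved, stated in full; the proofs are below) =====
def Claim_equal_get_dict_organs_by_cell_type : Prop := ∀ (d_samples_by_cell_type : List (String × List String)) (list_organs : List String), Dom_get_dict_organs_by_cell_type d_samples_by_cell_type list_organs → Pre_get_dict_organs_by_cell_type d_samples_by_cell_type list_organs → Spec_get_dict_organs_by_cell_type d_samples_by_cell_type list_organs (get_dict_organs_by_cell_type d_samples_by_cell_type list_organs)

-- ===== LEMMAS AND PROOFS =====

-- first character of a key, as the string Python's key[0] / key[:1] yields
def pvKey1 (s : String) : String := PySem.Str.slice s none (some 1)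

-- the bucket of organ g: the samples whose key starts with g, in sample order
def pvBucket (d : List (String × List String)) (g : String) : PySem.Dict String (List String) :=
  (d.filter (fun kv => decide (pvKey1 kv.1 = g))).foldl (fun v kv => v.insert kv.1 kv.2) PySem.Dict.empty

lemma pvKey1_eq_ofList_head (s : String) (c : Char) (cs : List Char) (h : s.toList = c :: cs) :
    pvKey1 s = String.ofList [c] := by
  apply String.toList_inj.mp
  rw [show (String.ofList [c]).toList = [c] by simp]
  rw [show (pvKey1 s).toList = PySem.List.slice s.toList none (some 1) by
    simp [pvKey1, PySem.Str.toList_slice, PySem.Chars.slice_eq_listSlice]]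
  rw [h, PySem.List.slice_to _ (by norm_num : (0 : Int) ≤ 1)]
  simp

lemma pvInsert_getD_self {κ ν : Type} [BEq κ] [LawfulBEq κ] (a : PySem.Dict κ ν) (g : κ) (e : ν)
    (hc : a.contains g = true) (hn : a.keys.Nodup) : a.insert g (a.getD g e) = a := by
  apply PySem.Dict.ext
  rw [PySem.Dict.items_insert_of_contains _ _ hc]
  have : ∀ p ∈ a.items, (if (p.1 == g) = true then (g, a.getD g e) else p) = p := by
    intro p hp
    by_cases h : p.1 = g
    · subst h
      have hv : a.getD p.1 e = p.2 := by
        have : (p.1, p.2) ∈ a.items := by simpa using hp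
        exact PySem.Dict.getD_of_mem_items a this hn e
      simp [hv]
    · simp [h]
  calc List.map (fun p => if (p.1 == g) = true then (g, a.getD g e) else p) a.items
      = List.map id a.items := List.map_congr_left (by simpa using this)
    _ = a.items := List.map_id a.items

-- a fold of modifications at one fixed, present key is a single overwrite
lemma pvFoldl_modify_fixed {κ ν β : Type} [BEq κ] [LawfulBEq κ] (l : List β) (g : κ) (e : ν)
    (f : β → ν → ν) (a : PySem.Dict κ ν) (hc : a.contains g = true) (hn : a.keys.Nodup) :
    l.foldl (fun acc x => acc.modify g e (f x)) a = a.insert g (l.foldl (fun v x => f x v) (a.getD g e)) := by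
  induction l generalizing a with
  | nil => simpa using (pvInsert_getD_self a g e hc hn).symm
  | cons x l ih =>
    have hm : a.modify g e (f x) = a.insert g (f x (a.getD g e)) := rfl
    simp only [List.foldl_cons, hm]
    rw [ih (a.insert g (f x (a.getD g e))) (PySem.Dict.contains_insert_self a g _)
      (PySem.Dict.nodup_keys_insert a g _ hn)]
    rw [PySem.Dict.getD_insert_self, PySem.Dict.insert_insert_self]

-- A's inner loop over the samples, for one organ, is a single bucket insert
lemma pvInnerA (d : List (String × List String)) (g : String)
    (acc : PySem.Dict String (PySem.Dict String (List String)))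
    (hn : acc.keys.Nodup) (hnd : (d.map Prod.fst).Nodup) (hne : ∀ kv ∈ d, kv.1 ≠ "") :
    List.foldl (fun acc2 kv =>
        match PySem.Str.pyGet? kv.1 0 with
        | none => acc2
        | some c =>
          if String.ofList [c] = g then
            acc2.modify g PySem.Dict.empty (fun inner => inner.insert kv.1 ((PySem.Dict.mk d).getD kv.1 []))
          else acc2)
      (acc.insert g PySem.Dict.empty) d
      = acc.insert g (pvBucket d g) := by
  have hcongr : List.foldl (fun acc2 kv =>
        match PySem.Str.pyGet? kv.1 0 with
        | none => acc2
        | some c =>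
          if String.ofList [c] = g then
            acc2.modify g PySem.Dict.empty (fun inner => inner.insert kv.1 ((PySem.Dict.mk d).getD kv.1 []))
          else acc2)
      (acc.insert g PySem.Dict.empty) d
      = List.foldl (fun acc2 kv =>
          if decide (pvKey1 kv.1 = g) = true then
            acc2.modify g PySem.Dict.empty (fun inner => inner.insert kv.1 kv.2)
          else acc2)
        (acc.insert g PySem.Dict.empty) d := by
    apply PySem.List.foldl_congr_mem
    intro acc2 kv hkv
    obtain ⟨c, cs, hcs⟩ : ∃ c cs, kv.1.toList = c :: cs := by
      rcases h : kv.1.toList with _ | ⟨c, cs⟩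
      · exact absurd (by simpa using congrArg String.ofList h) (hne kv hkv)
      · exact ⟨c, cs, rfl⟩
    have hget : PySem.Str.pyGet? kv.1 0 = some c := by
      simp [PySem.Str.pyGet?_eq, hcs]
    have hval : (PySem.Dict.mk d).getD kv.1 [] = kv.2 := by
      have : (kv.1, kv.2) ∈ (PySem.Dict.mk d).items := by simpa using hkv
      exact PySem.Dict.getD_of_mem_items _ this (by simpa using hnd) []
    rw [hget, hval, pvKey1_eq_ofList_head kv.1 c cs hcs]
    by_cases h : String.ofList [c] = g <;> simp [h]
  rw [hcongr, PySem.List.foldl_if_eq_foldl_filter]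
  rw [pvFoldl_modify_fixed _ g PySem.Dict.empty _ _ (PySem.Dict.contains_insert_self acc g _)
    (PySem.Dict.nodup_keys_insert acc g _ hn)]
  rw [PySem.Dict.getD_insert_self, PySem.Dict.insert_insert_self]
  rfl

-- A's whole loop nest is a fold of bucket inserts over the organs
lemma pvPortA_closed (d : List (String × List String)) (organs : List String)
    (acc : PySem.Dict String (PySem.Dict String (List String)))
    (hn : acc.keys.Nodup) (hnd : (d.map Prod.fst).Nodup) (hne : ∀ kv ∈ d, kv.1 ≠ "") :
    organs.foldl (fun acc organ =>
      List.foldl (fun acc2 kv =>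
        match PySem.Str.pyGet? kv.1 0 with
        | none => acc2
        | some c =>
          if String.ofList [c] = organ then
            acc2.modify organ PySem.Dict.empty (fun inner => inner.insert kv.1 ((PySem.Dict.mk d).getD kv.1 []))
          else acc2)
        (acc.insert organ PySem.Dict.empty) d) acc
    = organs.foldl (fun a g => a.insert g (pvBucket d g)) acc := by
  induction organs generalizing acc with
  | nil => rfl
  | cons g organs ih =>
    simp only [List.foldl_cons]
    rw [pvInnerA d g acc hn hnd hne]
    exact ih _ (PySem.Dict.nodup_keys_insert acc g _ hn)

lemma pvGetD_foldl_insert_value {ν : Type} (l : List String) (B : String → ν)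
    (a : PySem.Dict String ν) (e : ν) (o : String) :
    (l.foldl (fun a g => a.insert g (B g)) a).getD o e = if o ∈ l then B o else a.getD o e := by
  induction l generalizing a with
  | nil => simp
  | cons g l ih =>
    simp only [List.foldl_cons, ih, List.mem_cons]
    by_cases hl : o ∈ l
    · simp [hl]
    · by_cases hg : o = g
      · simp [hg, PySem.Dict.getD_insert_self]
      · simp [hl, hg, PySem.Dict.getD_insert_of_ne _ _ _ hg]

-- B's routing pass never changes the outer key list
lemma pvFillB_keys (l : List (String × List String))
    (a : PySem.Dict String (PySem.Dict String (List String))) :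
    (List.foldl (fun acc kv =>
      if acc.contains (PySem.Str.slice kv.1 none (some 1)) then
        acc.modify (PySem.Str.slice kv.1 none (some 1)) PySem.Dict.empty (fun inner => inner.insert kv.1 kv.2)
      else acc) a l).keys = a.keys := by
  induction l generalizing a with
  | nil => rfl
  | cons kv l ih =>
    simp only [List.foldl_cons]
    by_cases hc : a.contains (PySem.Str.slice kv.1 none (some 1)) = true
    · rw [if_pos hc, ih]
      rw [PySem.Dict.keys_modify, PySem.Dict.keys_insert_of_contains _ _ hc]
    · rw [if_neg (by simpa using hc), ih]

-- the value B's routing pass leaves at key o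
lemma pvFillB_getD (l : List (String × List String))
    (a : PySem.Dict String (PySem.Dict String (List String))) (o : String) :
    (List.foldl (fun acc kv =>
      if acc.contains (PySem.Str.slice kv.1 none (some 1)) then
        acc.modify (PySem.Str.slice kv.1 none (some 1)) PySem.Dict.empty (fun inner => inner.insert kv.1 kv.2)
      else acc) a l).getD o PySem.Dict.empty
    = (l.filter (fun kv => decide (pvKey1 kv.1 = o) && a.contains o)).foldl
        (fun v kv => v.insert kv.1 kv.2) (a.getD o PySem.Dict.empty) := by
  induction l generalizing a with
  | nil => rfl
  | cons kv l ih =>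
    simp only [List.foldl_cons]
    by_cases hc : a.contains (PySem.Str.slice kv.1 none (some 1)) = true
    · rw [if_pos hc]
      have hm : a.modify (PySem.Str.slice kv.1 none (some 1)) PySem.Dict.empty (fun inner => inner.insert kv.1 kv.2)
          = a.insert (PySem.Str.slice kv.1 none (some 1))
              ((a.getD (PySem.Str.slice kv.1 none (some 1)) PySem.Dict.empty).insert kv.1 kv.2) := rfl
      rw [hm, ih]
      have hck : ∀ j, (a.insert (PySem.Str.slice kv.1 none (some 1))
          ((a.getD (PySem.Str.slice kv.1 none (some 1)) PySem.Dict.empty).insert kv.1 kv.2)).contains j = a.contains j := by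
        intro j
        rw [PySem.Dict.contains_insert]
        by_cases hj : j = PySem.Str.slice kv.1 none (some 1)
        · simp [hj, hc]
        · simp [hj]
      rw [List.filter_congr (fun x _ => by rw [hck o])]
      by_cases ho : pvKey1 kv.1 = o
      · have hoc : a.contains o = true := by rw [← ho]; exact hc
        rw [List.filter_cons_of_pos (by simp [ho, hoc])]
        simp only [List.foldl_cons]
        rw [show pvKey1 kv.1 = PySem.Str.slice kv.1 none (some 1) from rfl] at ho
        rw [← ho, PySem.Dict.getD_insert_self]
      · rw [List.filter_cons_of_neg (by simp [ho])]
        rw [PySem.Dict.getD_insert_of_ne _ _ _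
          (show o ≠ PySem.Str.slice kv.1 none (some 1) from fun h => ho h.symm)]
    · rw [if_neg (by simpa using hc), ih]
      by_cases ho : pvKey1 kv.1 = o
      · have : a.contains o = false := by
          rw [← ho]; simpa using hc
        rw [List.filter_cons_of_neg (by simp [this])]
      · rw [List.filter_cons_of_neg (by simp [ho])]

-- B's initial bucket table: keys are the distinct organs, every value is the empty dict
lemma pvInit_getD (organs : List String) (a : PySem.Dict String (PySem.Dict String (List String))) (o : String)
    (h : a.getD o PySem.Dict.empty = PySem.Dict.empty) :
    (organs.foldl (fun acc organ => acc.insert organ PySem.Dict.empty) a).getD o PySem.Dict.empty = PySem.Dict.empty := by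
  induction organs generalizing a with
  | nil => simpa using h
  | cons g organs ih =>
    simp only [List.foldl_cons]
    apply ih
    rw [PySem.Dict.getD_insert]
    split <;> simp [h]

lemma pvInit_keys (organs : List String) :
    (organs.foldl (fun acc organ => acc.insert organ PySem.Dict.empty)
      (PySem.Dict.empty : PySem.Dict String (PySem.Dict String (List String)))).keys = PySem.Set.ofList organs := by
  rw [PySem.Dict.keys_foldl_insert organs (fun _ _ => PySem.Dict.empty) PySem.Dict.empty]
  rw [PySem.Set.ofList_eq_foldl]
  rfl

lemma pvResA_keys (d : List (String × List String)) (organs : List String) :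
    (organs.foldl (fun a g => a.insert g (pvBucket d g))
      (PySem.Dict.empty : PySem.Dict String (PySem.Dict String (List String)))).keys = PySem.Set.ofList organs := by
  rw [PySem.Dict.keys_foldl_insert organs (fun _ g => pvBucket d g) PySem.Dict.empty]
  rw [PySem.Set.ofList_eq_foldl]
  rfl

-- B's routing pass over an empty bucket table does nothing
lemma pvFillB_empty (l : List (String × List String)) :
    List.foldl (fun acc kv =>
      if acc.contains (PySem.Str.slice kv.1 none (some 1)) then
        acc.modify (PySem.Str.slice kv.1 none (some 1)) PySem.Dict.empty (fun inner => inner.insert kv.1 kv.2)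
      else acc) (PySem.Dict.empty : PySem.Dict String (PySem.Dict String (List String))) l
    = PySem.Dict.empty := by
  induction l with
  | nil => rfl
  | cons kv l ih => simpa using ih

-- ===== VERDICT (by name: the statement is the Claim_ definition above) =====
theorem get_dict_organs_by_cell_type_spec : Claim_equal_get_dict_organs_by_cell_type := by
  intro d organs _ hpre
  obtain ⟨hnd, hdisj⟩ := hpre
  unfold Spec_get_dict_organs_by_cell_type get_dict_organs_by_cell_type get_dict_organs_by_cell_type_alt
  simp only []
  rcases hdisj with rfl | hne
  · -- no organs: both sides are the empty dict
    simp only [List.foldl_nil]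
    rw [pvFillB_empty]
  · -- general case: compare the two outer dicts key by key
    rw [pvPortA_closed d organs PySem.Dict.empty (by simp [PySem.Dict.keys_empty]) hnd hne]
    set resA := organs.foldl (fun a g => a.insert g (pvBucket d g))
      (PySem.Dict.empty : PySem.Dict String (PySem.Dict String (List String))) with hresA
    set init := organs.foldl (fun acc organ => acc.insert organ PySem.Dict.empty)
      (PySem.Dict.empty : PySem.Dict String (PySem.Dict String (List String))) with hinit
    set resB := List.foldl (fun acc kv =>
        if acc.contains (PySem.Str.slice kv.1 none (some 1)) then
          acc.modify (PySem.Str.slice kv.1 none (some 1)) PySem.Dict.empty (fun inner => inner.insert kv.1 kv.2)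
        else acc) init d with hresB
    have hkA : resA.keys = PySem.Set.ofList organs := pvResA_keys d organs
    have hkB : resB.keys = PySem.Set.ofList organs := by
      rw [hresB, pvFillB_keys, hinit, pvInit_keys]
    have hnA : resA.keys.Nodup := by rw [hkA]; exact PySem.Set.nodup_ofList organs
    have hnB : resB.keys.Nodup := by rw [hkB]; exact PySem.Set.nodup_ofList organs
    have hitems : resA.items = resB.items := by
      rw [PySem.Dict.items_eq_map_keys resA hnA PySem.Dict.empty,
        PySem.Dict.items_eq_map_keys resB hnB PySem.Dict.empty, hkA, hkB]
      apply List.map_congr_left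
      intro o ho
      have hom : o ∈ organs := (PySem.Set.mem_ofList organs o).mp ho
      have hgA : resA.getD o PySem.Dict.empty = pvBucket d o := by
        rw [hresA, pvGetD_foldl_insert_value, if_pos hom]
      have hco : init.contains o = true := by
        rw [PySem.Dict.contains_iff_mem_keys, hinit, pvInit_keys]; exact ho
      have hgB : resB.getD o PySem.Dict.empty = pvBucket d o := by
        rw [hresB, pvFillB_getD, pvInit_getD organs PySem.Dict.empty o (by simp)]
        unfold pvBucket
        congr 1
        apply List.filter_congr
        intro kv _
        simp [hco]
      rw [hgA, hgB]
    rw [hitems]
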